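-- pv_equiv track=rewrite | github.com/lgbTime/PSVGT | SV_Genotyper/sub_genotyper_by_df_V1.py | get_spans
-- ===== SOURCE A (Python) =====
-- def get_spans(chromosome, start, cigar_types, cigar_numbers):
--     """Generate spans based on CIGAR information."""
--     current_position = start
--     spans = {}
--     for ctype, cnum in zip(cigar_types, cigar_numbers):
--         if ctype == 'M':
--             # For matches, calculate the span and update current position
--             end_position = current_position + cnum
--             span_key = f"{chromosome}:{current_position}-{end_position}"
--             spans[span_key] = (current_position, end_position)
--             current_position = end_position  # Move current position to end of match
--         elif ctype == 'D':
--             # For deletions, move the current position forward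
--             current_position += cnum  # Skip over the deleted region
--     return spans
-- ===== SOURCE B (Python) =====
-- def get_spans(chromosome, start, cigar_types, cigar_numbers):
--     """Two-pass: build a prefix-sum positions table, then emit spans for 'M' ops."""
--     ops = list(zip(cigar_types, cigar_numbers))
--     positions = [start]
--     p = start
--     for t, n in ops:
--         p = p + (n if t in ('M', 'D') else 0)
--         positions.append(p)
--     spans = {}
--     for (t, n), pos in zip(ops, positions):
--         if t == 'M':
--             spans[f"{chromosome}:{pos}-{pos + n}"] = (pos, pos + n)
--     return spans
-- ===== Notes on version B (the rewrite author's own statement) =====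
-- stated objective: alternative
-- what changed: Replaced A's single stateful accumulator loop (current_position threaded through one pass) with a two-pass decomposition: a prefix-sum positions table is built first, then a second pass over the ops zipped with their tabulated start positions emits the span dict entries for 'M' ops.
import Mathlib
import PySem

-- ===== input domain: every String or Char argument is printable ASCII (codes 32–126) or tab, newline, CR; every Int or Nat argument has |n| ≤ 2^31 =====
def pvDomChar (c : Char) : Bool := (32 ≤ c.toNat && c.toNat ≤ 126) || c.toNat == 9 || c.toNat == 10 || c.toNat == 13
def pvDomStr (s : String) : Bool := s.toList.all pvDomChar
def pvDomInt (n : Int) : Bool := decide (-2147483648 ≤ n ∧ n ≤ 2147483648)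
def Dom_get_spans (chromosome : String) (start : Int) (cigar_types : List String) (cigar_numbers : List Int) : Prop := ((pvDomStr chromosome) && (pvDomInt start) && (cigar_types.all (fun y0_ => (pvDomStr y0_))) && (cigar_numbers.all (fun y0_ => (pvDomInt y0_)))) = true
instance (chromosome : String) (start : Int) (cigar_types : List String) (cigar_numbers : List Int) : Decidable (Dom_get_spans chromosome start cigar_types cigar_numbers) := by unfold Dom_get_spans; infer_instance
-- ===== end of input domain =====

-- B replaces A's single stateful accumulator loop by a two-pass decomposition: a prefix-sum
-- positions table first, then a second pass emitting spans for 'M' ops (objective: alternative).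


-- ===== PORT A =====
-- f"{chromosome}:{p}-{e}" ported as string concatenation with PySem.Int.toStr (exact)
def spanKey (chromosome : String) (p e : Int) : String :=
  chromosome ++ ":" ++ PySem.Int.toStr p ++ "-" ++ PySem.Int.toStr e

def stepA (chromosome : String) (st : Int × PySem.Dict String (Int × Int)) (op : String × Int) :
    Int × PySem.Dict String (Int × Int) :=
  if op.1 = "M" then
    let e := st.1 + op.2
    (e, st.2.insert (spanKey chromosome st.1 e) (st.1, e))
  else if op.1 = "D" then (st.1 + op.2, st.2)
  else st

def get_spans (chromosome : String) (start : Int) (cigar_types : List String) (cigar_numbers : List Int) : List (String × Int × Int) :=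
  (((cigar_types.zip cigar_numbers).foldl (stepA chromosome)
      (start, (PySem.Dict.empty : PySem.Dict String (Int × Int)))).2).items

-- ===== PORT B =====
-- advance of one op: cnum if 'M' or 'D', else 0
def spanAdv (op : String × Int) : Int := if op.1 = "M" ∨ op.1 = "D" then op.2 else 0

-- first pass: p = p + adv; positions.append(p)
def posStep (st : Int × List Int) (op : String × Int) : Int × List Int :=
  let p := st.1 + spanAdv op
  (p, st.2 ++ [p])

-- second pass: emit a span for each 'M' op at its tabulated position
def emitStep (chromosome : String) (d : PySem.Dict String (Int × Int)) (x : (String × Int) × Int) :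
    PySem.Dict String (Int × Int) :=
  if x.1.1 = "M" then
    d.insert (spanKey chromosome x.2 (x.2 + x.1.2)) (x.2, x.2 + x.1.2)
  else d

def get_spans_alt (chromosome : String) (start : Int) (cigar_types : List String) (cigar_numbers : List Int) : List (String × Int × Int) :=
  let ops := cigar_types.zip cigar_numbers
  let positions := (ops.foldl posStep (start, [start])).2
  ((ops.zip positions).foldl (emitStep chromosome)
      (PySem.Dict.empty : PySem.Dict String (Int × Int))).items

-- ===== PRECONDITION & SPEC =====
def Spec_get_spans (chromosome : String) (start : Int) (cigar_types : List String) (cigar_numbers : List Int) (out : List (String × Int × Int)) : Prop := out = get_spans_alt chromosome start cigar_types cigar_numbers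
instance (chromosome : String) (start : Int) (cigar_types : List String) (cigar_numbers : List Int) (out : List (String × Int × Int)) : Decidable (Spec_get_spans chromosome start cigar_types cigar_numbers out) := by unfold Spec_get_spans; infer_instance

-- ===== CLAIM (what is proved, stated in full; the proofs are below) =====
def Claim_equal_get_spans : Prop := ∀ (chromosome : String) (start : Int) (cigar_types : List String) (cigar_numbers : List Int), Dom_get_spans chromosome start cigar_types cigar_numbers → Spec_get_spans chromosome start cigar_types cigar_numbers (get_spans chromosome start cigar_types cigar_numbers)

-- ===== LEMMAS AND PROOFS =====

-- the streamed tail of the positions table: positions after the initial `start`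
def tailScan (p : Int) : List (String × Int) → List Int
  | [] => []
  | op :: t => (p + spanAdv op) :: tailScan (p + spanAdv op) t

-- the first pass produces acc ++ the scanned tail
theorem posFold_snd (ops : List (String × Int)) : ∀ (p : Int) (acc : List Int),
    (ops.foldl posStep (p, acc)).2 = acc ++ tailScan p ops := by
  induction ops with
  | nil => intro p acc; simp [tailScan]
  | cons op t ih =>
      intro p acc
      simp only [List.foldl_cons, posStep, tailScan, ih]
      simp

-- A's stateful loop equals B's emit pass over the position table
theorem main_lemma (chromosome : String) (ops : List (String × Int)) :
    ∀ (p : Int) (d : PySem.Dict String (Int × Int)),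
    (ops.foldl (stepA chromosome) (p, d)).2 =
      (ops.zip (p :: tailScan p ops)).foldl (emitStep chromosome) d := by
  induction ops with
  | nil => intro p d; simp
  | cons op t ih =>
      intro p d
      simp only [List.foldl_cons, tailScan, List.zip_cons_cons]
      by_cases hM : op.1 = "M"
      · have hadv : spanAdv op = op.2 := by simp [spanAdv, hM]
        simp only [stepA, hM, if_pos, hadv, emitStep, ih]
      · by_cases hD : op.1 = "D"
        · have hadv : spanAdv op = op.2 := by simp [spanAdv, hD]
          simp only [stepA, hM, if_pos hD, hadv, emitStep, ih]
          simp
        · have hadv : spanAdv op = 0 := by simp [spanAdv, hM, hD]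
          simp only [stepA, hM, hD, hadv, emitStep, ih]
          simp

-- ===== VERDICT (by name: the statement is the Claim_ definition above) =====
theorem get_spans_spec : Claim_equal_get_spans := by
  intro chromosome start cigar_types cigar_numbers _
  unfold Spec_get_spans get_spans get_spans_alt
  simp only []
  rw [posFold_snd, List.singleton_append, main_lemma]
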